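-- pv_equiv track=rewrite | github.com/fduda/Intro_prog | Prova Final/Moed Bet/questao10.py | power_replicate
-- ===== SOURCE A (Python) =====
-- def power_replicate(lst):
--     number_of_appearances = [1]
--     elements = [lst[0]]
--
--     for i in range(1, len(lst)):
--         if lst[i - 1] == lst[i]:
--             number_of_appearances[-1] += 1
--         else:
--             number_of_appearances.append(1)
--             elements.append(lst[i])
--
--     final_lst = []
--
--     for i in range(len(elements)):
--         j = 0
--         while j < 2**number_of_appearances[i]:
--             final_lst.append(elements[i])
--             j += 1
--
--     return  final_lst
-- ===== SOURCE B (Python) =====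
-- def power_replicate(lst):
--     if not lst:
--         return []
--     result = []
--     prev = lst[0]
--     count = 1
--     for x in lst[1:]:
--         if x == prev:
--             count += 1
--         else:
--             result.extend([prev] * 2**count)
--             prev, count = x, 1
--     result.extend([prev] * 2**count)
--     return result
-- ===== Notes on version B (the rewrite author's own statement) =====
-- stated objective: simpler
-- what changed: Single streaming pass with a prev/count accumulator that flushes each run directly into the result, instead of first building parallel elements/number_of_appearances arrays and then materializing them with an indexed while loop.
import Mathlib
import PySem

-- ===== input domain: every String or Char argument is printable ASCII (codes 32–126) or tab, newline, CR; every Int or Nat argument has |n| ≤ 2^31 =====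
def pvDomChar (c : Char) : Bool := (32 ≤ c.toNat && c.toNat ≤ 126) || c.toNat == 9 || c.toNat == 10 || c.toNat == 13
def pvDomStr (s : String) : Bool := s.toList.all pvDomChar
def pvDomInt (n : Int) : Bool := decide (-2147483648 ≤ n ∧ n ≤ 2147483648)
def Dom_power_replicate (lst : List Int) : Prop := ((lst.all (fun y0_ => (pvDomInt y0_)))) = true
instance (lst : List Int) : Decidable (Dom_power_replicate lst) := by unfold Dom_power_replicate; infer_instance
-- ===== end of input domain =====

-- B replaces A's two-phase build (parallel run-length arrays, then an indexed while-loop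
-- materialization) by one streaming pass with a prev/count accumulator; on the empty list,
-- where A raises IndexError, B returns [].


-- ===== PORT A =====
-- number_of_appearances[-1] += 1
def pvIncLast : List Nat → List Nat
  | [] => []
  | [c] => [c + 1]
  | c :: rest => c :: pvIncLast rest

-- 'j = 0; while j < bound: final_lst.append(e); j += 1'
def pvWhileA (e : Int) (bound : Nat) (j : Nat) (acc : List Int) : List Int :=
  if j < bound then pvWhileA e bound (j + 1) (acc ++ [e]) else acc
termination_by bound - j

def power_replicate (lst : List Int) : List Int :=
  -- lst[0] raises IndexError on [] in Python: Pre_ excludes []; default 0 is unreachable.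
  let st := (PySem.List.pyRange 1 (lst.length : Int)).foldl
    (fun (st : List Nat × List Int) i =>
      if PySem.List.pyGetD lst (i - 1) 0 = PySem.List.pyGetD lst i 0
      then (pvIncLast st.1, st.2)
      else (st.1 ++ [1], st.2 ++ [PySem.List.pyGetD lst i 0]))
    ([1], [PySem.List.pyGetD lst 0 0])
  (PySem.List.pyRange 0 (st.2.length : Int)).foldl
    (fun acc i => pvWhileA (PySem.List.pyGetD st.2 i 0) (2 ^ PySem.List.pyGetD st.1 i 0) 0 acc) []

-- ===== PORT B =====
def pvRunB (prev : Int) (count : Nat) (acc : List Int) : List Int → List Int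
  | [] => acc ++ List.replicate (2 ^ count) prev
  | x :: rest =>
      if x = prev then pvRunB prev (count + 1) acc rest
      else pvRunB x 1 (acc ++ List.replicate (2 ^ count) prev) rest

def power_replicate_alt : List Int → List Int
  | [] => []
  | x :: rest => pvRunB x 1 [] rest

-- ===== PRECONDITION & SPEC =====
-- Pre_ excludes only the empty list, on which A raises IndexError at lst[0].
def Pre_power_replicate (lst : List Int) : Prop := lst ≠ []
instance (lst : List Int) : Decidable (Pre_power_replicate lst) := by unfold Pre_power_replicate; infer_instance
def pvWitness_power_replicate : List Int := [1, 1, 2]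

def Spec_power_replicate (lst : List Int) (out : List Int) : Prop := out = power_replicate_alt lst
instance (lst : List Int) (out : List Int) : Decidable (Spec_power_replicate lst out) := by unfold Spec_power_replicate; infer_instance

-- ===== CLAIM (what is proved, stated in full; the proofs are below) =====
def Claim_equal_power_replicate : Prop := ∀ (lst : List Int), Dom_power_replicate lst → Pre_power_replicate lst → Spec_power_replicate lst (power_replicate lst)

-- ===== LEMMAS AND PROOFS =====

-- run-length state kept most-recent-run-first
def stepRev : List (Int × Nat) → Int → List (Int × Nat)
  | [], a => [(a, 1)]
  | (e, c) :: t, a => if a = e then (e, c + 1) :: t else (a, 1) :: (e, c) :: t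

def blow (p : Int × Nat) : List Int := List.replicate (2 ^ p.2) p.1

def stToPair (r : List (Int × Nat)) : List Nat × List Int :=
  ((r.map Prod.snd).reverse, (r.map Prod.fst).reverse)

def runOut : Int → Nat → List Int → List Int
  | prev, count, [] => List.replicate (2 ^ count) prev
  | prev, count, x :: rest =>
      if x = prev then runOut prev (count + 1) rest
      else List.replicate (2 ^ count) prev ++ runOut x 1 rest

theorem whileA_eq (e : Int) (bound : Nat) : ∀ (j : Nat) (acc : List Int),
    pvWhileA e bound j acc = acc ++ List.replicate (bound - j) e := by
  intro j acc
  fun_induction pvWhileA e bound j acc with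
  | case1 j acc h ih =>
      rw [ih]
      have hb : bound - j = (bound - (j + 1)) + 1 := by omega
      rw [hb, List.replicate_succ]
      simp
  | case2 j acc h =>
      have hb : bound - j = 0 := by omega
      simp [hb]

theorem incLast_append (xs : List Nat) (c : Nat) : pvIncLast (xs ++ [c]) = xs ++ [c + 1] := by
  induction xs with
  | nil => rfl
  | cons a t ih => cases t <;> simp_all [pvIncLast]

theorem runB_runOut : ∀ (rest : List Int) (prev : Int) (count : Nat) (acc : List Int),
    pvRunB prev count acc rest = acc ++ runOut prev count rest := by
  intro rest
  induction rest with
  | nil => intro prev count acc; simp [pvRunB, runOut]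
  | cons x t ih =>
      intro prev count acc
      simp only [pvRunB, runOut]
      split_ifs with h
      · exact ih _ _ _
      · rw [ih]; simp

theorem runOut_stepRev : ∀ (rest : List Int) (prev : Int) (count : Nat) (r : List (Int × Nat)),
    ((rest.foldl stepRev ((prev, count) :: r)).reverse.flatMap blow)
      = (r.reverse.flatMap blow) ++ runOut prev count rest := by
  intro rest
  induction rest with
  | nil => intro prev count r; simp [runOut, blow]
  | cons x t ih =>
      intro prev count r
      simp only [List.foldl_cons, runOut]
      by_cases h : x = prev
      · simp [stepRev, h, ih]
      · simp only [stepRev, if_neg h, ih]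
        simp [blow]

theorem loopA_inv (lst : List Int) : ∀ (suf : List Int) (k : Nat), lst.drop k = suf → 1 ≤ k →
    ∀ (e : Int) (c : Nat) (t : List (Int × Nat)),
      PySem.List.pyGetD lst ((k : Int) - 1) 0 = e →
      (PySem.List.pyRange (k : Int) (lst.length : Int)).foldl
        (fun (st : List Nat × List Int) i =>
          if PySem.List.pyGetD lst (i - 1) 0 = PySem.List.pyGetD lst i 0
          then (pvIncLast st.1, st.2)
          else (st.1 ++ [1], st.2 ++ [PySem.List.pyGetD lst i 0]))
        (stToPair ((e, c) :: t))
      = stToPair (suf.foldl stepRev ((e, c) :: t)) := by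
  intro suf
  induction suf with
  | nil =>
      intro k hk _ e c t _
      have hlen : lst.length ≤ k := by
        have := congrArg List.length hk
        simp at this
        omega
      rw [PySem.List.pyRange_one_eq_nil (by exact_mod_cast hlen)]
      simp
  | cons a suf' ih =>
      intro k hk hk1 e c t hhd
      have hlen : (lst.drop k).length = suf'.length + 1 := by rw [hk]; simp
      have hklt : k < lst.length := by simp at hlen; omega
      have hgetk : lst[k]? = some a := by
        have h0 : (lst.drop k)[0]? = lst[k]? := by
          rw [List.getElem?_drop]; simp
        rw [← h0, hk]; rfl
      have hpyk : PySem.List.pyGetD lst (k : Int) 0 = a := by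
        rw [PySem.List.pyGetD_natCast, List.getD, hgetk]; rfl
      have hdrop1 : lst.drop (k + 1) = suf' := by
        have : lst.drop (k + 1) = (lst.drop k).drop 1 := by
          rw [List.drop_drop]
        rw [this, hk]; rfl
      rw [PySem.List.pyRange_one_cons (by exact_mod_cast hklt)]
      simp only [List.foldl_cons, List.foldl_cons (f := stepRev)]
      rw [hhd, hpyk]
      have hcast : (k : Int) + 1 = ((k + 1 : Nat) : Int) := by push_cast; ring
      by_cases hea : e = a
      · rw [if_pos hea]
        have hst : (pvIncLast (stToPair ((e, c) :: t)).1, (stToPair ((e, c) :: t)).2)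
            = stToPair ((e, c + 1) :: t) := by
          simp [stToPair, incLast_append]
        rw [hst, hcast, ih (k + 1) hdrop1 (by omega) e (c + 1) t
              (by rw [show ((k + 1 : Nat) : Int) - 1 = (k : Int) by push_cast; ring, hpyk, hea])]
        have : stepRev ((e, c) :: t) a = (e, c + 1) :: t := by
          simp [stepRev, hea.symm]
        rw [this]
      · rw [if_neg hea]
        have hst : ((stToPair ((e, c) :: t)).1 ++ [1], (stToPair ((e, c) :: t)).2 ++ [a])
            = stToPair ((a, 1) :: (e, c) :: t) := by
          simp [stToPair]
        rw [hst, hcast, ih (k + 1) hdrop1 (by omega) a 1 ((e, c) :: t)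
              (by rw [show ((k + 1 : Nat) : Int) - 1 = (k : Int) by push_cast; ring, hpyk])]
        have : stepRev ((e, c) :: t) a = (a, 1) :: (e, c) :: t := by
          simp only [stepRev]
          rw [if_neg (fun h : a = e => hea h.symm)]
        rw [this]

theorem pyGetD_map_fst (zs : List (Int × Nat)) (i : Int) :
    PySem.List.pyGetD (zs.map Prod.fst) i 0 = (PySem.List.pyGetD zs i ((0 : Int), (0 : Nat))).1 :=
  PySem.List.pyGetD_map Prod.fst zs i ((0 : Int), (0 : Nat))

theorem pyGetD_map_snd (zs : List (Int × Nat)) (i : Int) :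
    PySem.List.pyGetD (zs.map Prod.snd) i 0 = (PySem.List.pyGetD zs i ((0 : Int), (0 : Nat))).2 :=
  PySem.List.pyGetD_map Prod.snd zs i ((0 : Int), (0 : Nat))

theorem flatten_pass (zs : List (Int × Nat)) :
    (PySem.List.pyRange 0 ((zs.map Prod.fst).length : Int)).foldl
      (fun acc i => pvWhileA (PySem.List.pyGetD (zs.map Prod.fst) i 0)
        (2 ^ PySem.List.pyGetD (zs.map Prod.snd) i 0) 0 acc) []
    = zs.flatMap blow := by
  simp only [whileA_eq, Nat.sub_zero, pyGetD_map_fst, pyGetD_map_snd, List.length_map]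
  rw [PySem.List.foldl_pyRange_zero_pyGetD' zs ((0 : Int), (0 : Nat))
        (fun acc p => acc ++ List.replicate (2 ^ p.2) p.1) []]
  rw [PySem.List.foldl_append_eq_flatMap]
  rfl

theorem power_replicate_eq (lst : List Int) (h : lst ≠ []) :
    power_replicate lst = power_replicate_alt lst := by
  cases lst with
  | nil => exact absurd rfl h
  | cons x rest =>
      have hx0 : PySem.List.pyGetD (x :: rest) 0 0 = x := by
        have := PySem.List.pyGetD_natCast (x :: rest) 0 0
        simpa using this
      have h0 : PySem.List.pyGetD (x :: rest) ((1 : Nat) - 1 : Int) 0 = x := by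
        norm_num [hx0]
      have hfold := loopA_inv (x :: rest) rest 1 rfl le_rfl x 1 [] h0
      rw [show (((1 : Nat) : Int)) = (1 : Int) by norm_num] at hfold
      simp only [power_replicate, hx0]
      rw [show (([1], [x]) : List Nat × List Int) = stToPair [(x, 1)] from rfl, hfold]
      simp only [stToPair, ← List.map_reverse]
      rw [flatten_pass]
      have hB := runB_runOut rest x 1 []
      have hS := runOut_stepRev rest x 1 []
      simp only [List.reverse_nil, List.flatMap_nil, List.nil_append] at hS
      rw [power_replicate_alt, hB, List.nil_append, ← hS]

-- ===== VERDICT (by name: the statement is the Claim_ definition above) =====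
theorem power_replicate_spec : Claim_equal_power_replicate := by
  intro lst _ hpre
  exact power_replicate_eq lst hpre
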